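-- pv_equiv track=rewrite | github.com/mxgiagnorio/Ejercitacion1UNGS | ejercicios6.py | listaAcotada
-- ===== SOURCE A (Python) =====
-- def listaAcotada(lista, a, b):
--
--     nuevaLista = []
--
--     for i in range(len(lista)):
--         if i > a and i < b:
--             nuevaLista.append(lista[i])
--         elif i < a and i > b:
--             nuevaLista.append(lista[i])
--
--     return nuevaLista
-- ===== SOURCE B (Python) =====
-- def listaAcotada(lista, a, b):
--     lo, hi = (a, b) if a < b else (b, a)
--     start = max(lo + 1, 0)
--     stop = min(hi, len(lista))
--     return lista[start:max(start, stop)]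
-- ===== Notes on version B (the rewrite author's own statement) =====
-- stated objective: faster
-- what changed: Replace the per-index scan (testing each i against both orderings of the window) by normalizing the window to (lo,hi)=(min,max), clamping its bounds to the valid index range, and returning a single slice.
import Mathlib
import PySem

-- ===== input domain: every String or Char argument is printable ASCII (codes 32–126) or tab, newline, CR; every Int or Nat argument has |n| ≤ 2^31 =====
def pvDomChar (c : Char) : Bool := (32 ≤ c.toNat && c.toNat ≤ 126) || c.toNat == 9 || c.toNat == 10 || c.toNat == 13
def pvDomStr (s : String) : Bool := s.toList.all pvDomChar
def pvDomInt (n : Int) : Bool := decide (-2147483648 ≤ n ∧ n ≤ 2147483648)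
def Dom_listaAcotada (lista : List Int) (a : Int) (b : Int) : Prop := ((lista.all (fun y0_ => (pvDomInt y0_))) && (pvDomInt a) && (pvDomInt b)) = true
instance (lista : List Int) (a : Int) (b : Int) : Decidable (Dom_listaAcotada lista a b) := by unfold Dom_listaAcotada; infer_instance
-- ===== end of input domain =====

-- B replaces A's per-index scan with clamped bounds plus one slice (objective: faster, constant factor).

-- ===== PORT A =====
-- for i in range(len(lista)): two branches appending lista[i]; lista[i] is always in range here,
-- so List.getD i 0 is exact.
def listaAcotada (lista : List Int) (a : Int) (b : Int) : List Int :=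
  (List.range lista.length).foldl (fun (nuevaLista : List Int) (i : Nat) =>
    if (i : Int) > a ∧ (i : Int) < b then nuevaLista ++ [lista.getD i 0]
    else if (i : Int) < a ∧ (i : Int) > b then nuevaLista ++ [lista.getD i 0]
    else nuevaLista) []

-- ===== PORT B =====
def listaAcotada_alt (lista : List Int) (a : Int) (b : Int) : List Int :=
  let lo := if a < b then a else b
  let hi := if a < b then b else a
  let start := max (lo + 1) 0
  let stop := min hi (lista.length : Int)
  PySem.List.slice lista (some start) (some (max start stop))

-- ===== PRECONDITION & SPEC =====
def Spec_listaAcotada (lista : List Int) (a : Int) (b : Int) (out : List Int) : Prop := out = listaAcotada_alt lista a b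
instance (lista : List Int) (a : Int) (b : Int) (out : List Int) : Decidable (Spec_listaAcotada lista a b out) := by unfold Spec_listaAcotada; infer_instance

-- ===== CLAIM (what is proved, stated in full; the proofs are below) =====
def Claim_equal_listaAcotada : Prop := ∀ (lista : List Int) (a : Int) (b : Int), Dom_listaAcotada lista a b → Spec_listaAcotada lista a b (listaAcotada lista a b)

-- ===== LEMMAS AND PROOFS =====

-- the indices of [0,n) lying in the Nat interval [s,T) form List.range' s (min T n - s)
theorem filter_range_interval (n s T : Nat) :
    (List.range n).filter (fun i => decide (s ≤ i ∧ i < T)) = List.range' s (min T n - s) := by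
  induction n with
  | zero => simp
  | succ n ih =>
    rw [List.range_succ, List.filter_append, ih]
    by_cases h : s ≤ n ∧ n < T
    · have e1 : min T n - s = n - s := by omega
      have e2 : n + 1 - s = (n - s) + 1 := by omega
      simp [h]
      rw [e1, e2, List.range'_concat]
      congr 2
      omega
    · have hmin : min T (n + 1) - s = min T n - s := by omega
      simp [h, hmin]

theorem map_getD_range' (lista : List Int) (s k : Nat) (h : s + k ≤ lista.length ∨ k = 0) :
    (List.range' s k).map (fun i => lista.getD i 0) = (lista.drop s).take k := by
  rcases h with h | rfl
  swap
  · simp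
  apply List.ext_getElem
  · simp; omega
  · intro j h1 h2
    simp only [List.getElem_map, List.getElem_range', List.getElem_take, List.getElem_drop]
    rw [List.getD_eq_getElem?_getD, List.getElem?_eq_getElem (by simp at h1 ⊢; omega)]
    simp

-- ===== VERDICT (by name: the statement is the Claim_ definition above) =====
theorem listaAcotada_spec : Claim_equal_listaAcotada := by
  intro lista a b _
  unfold Spec_listaAcotada
  have hB : listaAcotada_alt lista a b =
      PySem.List.slice lista (some (max ((if a < b then a else b) + 1) 0))
        (some (max (max ((if a < b then a else b) + 1) 0)
          (min (if a < b then b else a) (lista.length : Int)))) := rfl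
  rw [hB]
  unfold listaAcotada
  set n := lista.length with hn
  set lo := if a < b then a else b with hlo
  set hi := if a < b then b else a with hhi
  set start := max (lo + 1) 0 with hstart
  set stop := min hi (n : Int) with hstop
  set T := max start stop with hT
  have hs0 : 0 ≤ start := by omega
  have hT0 : 0 ≤ T := by omega
  -- fold with two branches = fold with one interval test
  have step : (List.range n).foldl (fun (nuevaLista : List Int) (i : Nat) =>
      if (i : Int) > a ∧ (i : Int) < b then nuevaLista ++ [lista.getD i 0]
      else if (i : Int) < a ∧ (i : Int) > b then nuevaLista ++ [lista.getD i 0]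
      else nuevaLista) [] =
      (List.range n).foldl (fun (nuevaLista : List Int) (i : Nat) =>
      if start.toNat ≤ i ∧ i < T.toNat then nuevaLista ++ [lista.getD i 0]
      else nuevaLista) [] := by
    apply PySem.List.foldl_congr_mem
    intro acc i hi'
    have hin : i < n := List.mem_range.mp hi'
    have key : (((i : Int) > a ∧ (i : Int) < b) ∨ ((i : Int) < a ∧ (i : Int) > b)) ↔
        (start.toNat ≤ i ∧ i < T.toNat) := by
      constructor
      · rintro (⟨h1, h2⟩ | ⟨h1, h2⟩) <;>
        · constructor
          · simp only [hstart, hlo]; split_ifs with hc <;> omega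
          · simp only [hT, hstop, hstart, hlo, hhi]; split_ifs with hc <;> omega
      · rintro ⟨h1, h2⟩
        simp only [hT, hstop, hstart, hlo, hhi] at h1 h2
        split_ifs at h1 h2 with hc
        · left; omega
        · by_cases hab : a = b
          · omega
          · right; omega
    by_cases hP : (i : Int) > a ∧ (i : Int) < b
    · simp [hP, key.mp (Or.inl hP)]
    · by_cases hQ : (i : Int) < a ∧ (i : Int) > b
      · simp [hP, hQ, key.mp (Or.inr hQ)]
      · have hnot : ¬ (start.toNat ≤ i ∧ i < T.toNat) := fun h => (by tauto : ¬ _) (key.mpr h)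
        simp [hP, hQ]
        omega
  have hsum : start.toNat + (min T.toNat n - start.toNat) ≤ n ∨
      min T.toNat n - start.toNat = 0 := by omega
  rw [step, PySem.List.foldl_append_ite (p := fun i => start.toNat ≤ i ∧ i < T.toNat)
      (f := fun i => lista.getD i 0), List.nil_append,
      filter_range_interval n start.toNat T.toNat,
      map_getD_range' lista start.toNat (min T.toNat n - start.toNat) hsum]
  -- B side: slice with nonnegative bounds
  have hsc : start = ((start.toNat : Nat) : Int) := by omega
  have hTc : T = ((T.toNat : Nat) : Int) := by omega
  rw [hsc, hTc, PySem.List.slice_natCast]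
  have hk : min T.toNat n - start.toNat = T.toNat - start.toNat := by
    -- if T.toNat > n then stop ≤ start, T = start, and both counts are 0
    by_cases hle : T.toNat ≤ n
    · omega
    · have h1 : stop ≤ start := by omega
      have h2 : T = start := by omega
      omega
  simp only [Int.toNat_natCast, hk]
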